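-- pv_equiv track=rewrite | github.com/loshan-malaka-kaluarachchi/HelaDevSweden-loshan-ToDoList | ToDo_List.py | search_by_status
-- ===== SOURCE A (Python) =====
-- items = [
--     ('1', 'Getting Familiar with the Python Development Environment', 'Complete'),
--     ('2', 'Python Data Types, Variables & Inbuilt functions', 'Complete'),
--     ('3', 'Flow Control', 'Complete'),
--     ('4', 'Flow Control in Python (Looping techniques)', 'Complete' ),
--     ('5', 'Functions in Python', 'Complete'),
--     ('6', 'Unit testing in Python', 'Complete'),
--     ('7', 'Functions, Modules, Unit Testing, Previous Excersises', 'Complete'),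
--     ('8', 'Applying Collection Types - Simple TODO application', 'Incomplete'),
--     ('9', 'Solution Discussion', 'Incomplete'),
--     ('10', 'HTTP Request handling and Web Scraping using Python', 'Incomplete')
-- ]
--
-- def fetch_status(t_status:str) -> str|None: # Called inside the match case block
--     ''' Return task status as a string literal (Complete | Incomplete) '''
--     if t_status == '0':
--         return 'Incomplete'
--     elif t_status == '1':
--         return 'Complete'
--     else:
--         return None
--
-- def search_by_status(fstatus) -> tuple|None:
--     '''Search and returns an item from the TO-DO list based on Task ID'''
--     completion = fetch_status(fstatus)
--     column_index = 2
--     search_results = []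
--     for item in items:
--         if item[column_index] == completion:
--             search_results.append(item)
--         else:
--             continue
--     return search_results
-- ===== SOURCE B (Python) =====
-- items = [
--     ('1', 'Getting Familiar with the Python Development Environment', 'Complete'),
--     ('2', 'Python Data Types, Variables & Inbuilt functions', 'Complete'),
--     ('3', 'Flow Control', 'Complete'),
--     ('4', 'Flow Control in Python (Looping techniques)', 'Complete' ),
--     ('5', 'Functions in Python', 'Complete'),
--     ('6', 'Unit testing in Python', 'Complete'),
--     ('7', 'Functions, Modules, Unit Testing, Previous Excersises', 'Complete'),
--     ('8', 'Applying Collection Types - Simple TODO application', 'Incomplete'),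
--     ('9', 'Solution Discussion', 'Incomplete'),
--     ('10', 'HTTP Request handling and Web Scraping using Python', 'Incomplete')
-- ]
--
-- def fetch_status(t_status: str):
--     if t_status == '0':
--         return 'Incomplete'
--     elif t_status == '1':
--         return 'Complete'
--     else:
--         return None
--
-- # Precomputed grouping: status -> list of items with that status, built once.
-- _groups = {}
-- for _item in items:
--     _groups.setdefault(_item[2], []).append(_item)
--
-- def search_by_status(fstatus):
--     '''Search and returns items from the TO-DO list by status, via a precomputed table.'''
--     completion = fetch_status(fstatus)
--     return list(_groups.get(completion, []))
-- ===== Notes on version B (the rewrite author's own statement) =====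
-- stated objective: idiomatic
-- what changed: B precomputes at module load a dict grouping items by status and answers each query with a single table lookup (get with [] default) instead of A's per-call linear scan over the whole list.
import Mathlib
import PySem

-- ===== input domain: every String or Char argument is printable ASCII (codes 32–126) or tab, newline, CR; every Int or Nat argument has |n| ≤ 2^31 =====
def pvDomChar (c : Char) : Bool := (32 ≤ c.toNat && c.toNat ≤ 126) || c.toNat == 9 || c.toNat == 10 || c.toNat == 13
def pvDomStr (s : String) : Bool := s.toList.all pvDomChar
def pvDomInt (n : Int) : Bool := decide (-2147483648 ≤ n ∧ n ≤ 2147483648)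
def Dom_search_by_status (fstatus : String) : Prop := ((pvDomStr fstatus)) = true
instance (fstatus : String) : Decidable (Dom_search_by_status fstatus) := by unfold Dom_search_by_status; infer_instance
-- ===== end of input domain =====

-- B replaces A's per-call linear filter with a precomputed status→items grouping table (idiomatic; return value only).

-- ===== PORT A =====
def pvItems : List (String × String × String) :=
  [("1", "Getting Familiar with the Python Development Environment", "Complete"),
   ("2", "Python Data Types, Variables & Inbuilt functions", "Complete"),
   ("3", "Flow Control", "Complete"),
   ("4", "Flow Control in Python (Looping techniques)", "Complete"),
   ("5", "Functions in Python", "Complete"),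
   ("6", "Unit testing in Python", "Complete"),
   ("7", "Functions, Modules, Unit Testing, Previous Excersises", "Complete"),
   ("8", "Applying Collection Types - Simple TODO application", "Incomplete"),
   ("9", "Solution Discussion", "Incomplete"),
   ("10", "HTTP Request handling and Web Scraping using Python", "Incomplete")]

def fetch_status (t_status : String) : Option String :=
  if t_status == "0" then some "Incomplete"
  else if t_status == "1" then some "Complete"
  else none

def search_by_status (fstatus : String) : List (String × String × String) :=
  let completion := fetch_status fstatus
  pvItems.foldl (fun search_results item =>
    if some item.2.2 == completion then search_results ++ [item] else search_results) []

-- ===== PORT B =====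
def pvFetchStatusB (t_status : String) : Option String :=
  if t_status == "0" then some "Incomplete"
  else if t_status == "1" then some "Complete"
  else none

-- module-load grouping table: status -> items with that status (setdefault + append)
def pvGroups : PySem.Dict String (List (String × String × String)) :=
  pvItems.foldl (fun d item => d.insert item.2.2 (d.getD item.2.2 [] ++ [item])) PySem.Dict.empty

def search_by_status_alt (fstatus : String) : List (String × String × String) :=
  match pvFetchStatusB fstatus with
  | none => []
  | some c => pvGroups.getD c []

-- ===== PRECONDITION & SPEC =====
def Spec_search_by_status (fstatus : String) (out : List (String × String × String)) : Prop := out = search_by_status_alt fstatus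
instance (fstatus : String) (out : List (String × String × String)) : Decidable (Spec_search_by_status fstatus out) := by unfold Spec_search_by_status; infer_instance

-- ===== CLAIM (what is proved, stated in full; the proofs are below) =====
def Claim_equal_search_by_status : Prop := ∀ (fstatus : String), Dom_search_by_status fstatus → Spec_search_by_status fstatus (search_by_status fstatus)

-- ===== LEMMAS AND PROOFS =====
theorem pv_eq_zero : search_by_status "0" = search_by_status_alt "0" := by decide
theorem pv_eq_one : search_by_status "1" = search_by_status_alt "1" := by decide
theorem pv_eq_other (fstatus : String) (h0 : ¬ fstatus = "0") (h1 : ¬ fstatus = "1") :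
    search_by_status fstatus = search_by_status_alt fstatus := by
  simp [search_by_status, search_by_status_alt, fetch_status, pvFetchStatusB, h0, h1, pvItems]

-- ===== VERDICT (by name: the statement is the Claim_ definition above) =====
theorem search_by_status_spec : Claim_equal_search_by_status := by
  intro fstatus _
  unfold Spec_search_by_status
  by_cases h0 : fstatus = "0"
  · subst h0; exact pv_eq_zero
  · by_cases h1 : fstatus = "1"
    · subst h1; exact pv_eq_one
    · exact pv_eq_other fstatus h0 h1
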